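-- pv_equiv track=rewrite | github.com/SENERGY-Platform/kafka-to-timescaledb-ew | ew/worker.py | remove_duplicates_from_batch
-- ===== SOURCE A (Python) =====
-- def remove_duplicates_from_batch(unique_col, data):
--     time_set = set()
--     new_batch = list()
--     for i in range(1, len(data) + 1):
--         row_cols = data[-i][0]
--         row_data = data[-i][1]
--         t_pos = row_cols.index(unique_col)
--         new_row_data = list()
--         for x in range(1, len(row_data) + 1):
--             row_data_item = row_data[-x]
--             timestamp = row_data_item[t_pos]
--             if not timestamp in time_set:
--                 new_row_data.append(row_data_item)
--                 time_set.add(timestamp)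
--         if len(new_row_data) > 0:
--             new_row_data.reverse()
--             new_batch.append((row_cols, new_row_data))
--     new_batch.reverse()
--     return new_batch
-- ===== SOURCE B (Python) =====
-- def remove_duplicates_from_batch(unique_col, data):
--     counts = {}
--     for row_cols, row_data in data:
--         t_pos = row_cols.index(unique_col)
--         for item in row_data:
--             ts = item[t_pos]
--             counts[ts] = counts.get(ts, 0) + 1
--     out = []
--     for row_cols, row_data in data:
--         t_pos = row_cols.index(unique_col)
--         kept = []
--         for item in row_data:
--             ts = item[t_pos]
--             counts[ts] = counts[ts] - 1
--             if counts[ts] == 0: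
--                 kept.append(item)
--         if kept:
--             out.append((row_cols, kept))
--     return out
-- ===== Notes on version B (the rewrite author's own statement) =====
-- stated objective: alternative
-- what changed: A deduplicates by scanning rows and items backward with a seen-set and reversing twice; B makes two forward passes: it first builds a dict counting occurrences of each timestamp, then scans forward decrementing the count and keeps exactly the item whose remaining count reaches zero (the last occurrence), so no reversals or set are needed.
import Mathlib
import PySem

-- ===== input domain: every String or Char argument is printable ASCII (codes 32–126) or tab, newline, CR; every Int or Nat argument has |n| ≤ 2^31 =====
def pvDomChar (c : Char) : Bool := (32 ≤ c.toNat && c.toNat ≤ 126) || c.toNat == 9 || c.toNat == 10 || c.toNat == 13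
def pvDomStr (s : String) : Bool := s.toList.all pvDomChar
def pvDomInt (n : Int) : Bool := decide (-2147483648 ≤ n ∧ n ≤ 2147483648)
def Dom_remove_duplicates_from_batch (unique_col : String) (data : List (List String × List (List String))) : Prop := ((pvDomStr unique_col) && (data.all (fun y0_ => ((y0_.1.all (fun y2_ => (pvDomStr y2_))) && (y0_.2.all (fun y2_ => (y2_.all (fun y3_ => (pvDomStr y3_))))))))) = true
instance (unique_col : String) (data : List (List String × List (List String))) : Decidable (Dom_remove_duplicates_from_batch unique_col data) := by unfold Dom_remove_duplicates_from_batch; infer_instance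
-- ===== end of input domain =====

-- B replaces A's backward scan with a seen-set (and double reversal) by two forward passes over a
-- timestamp-count dict, keeping an item exactly when its remaining count reaches zero (last occurrence);
-- an alternative decomposition of the same cost.


-- ===== PORT A =====
-- literal transliteration; the .getD defaults only totalize data[-i] / row_cols.index / item[t_pos],
-- which never fail under Pre_ (indices i,x stay in range; unique_col present; items long enough)
def remove_duplicates_from_batch (unique_col : String) (data : List (List String × List (List String))) : List (List String × List (List String)) :=
  let st :=
    (PySem.List.pyRange 1 ((data.length : Int) + 1) 1).foldl
      (fun (st : PySem.Set String × List (List String × List (List String))) i =>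
        let row := (PySem.List.pyGet? data (-i)).getD ([], [])
        let row_cols := row.1
        let row_data := row.2
        let t_pos : Int := (((PySem.List.index? row_cols unique_col).getD 0 : Nat) : Int)
        let st2 :=
          (PySem.List.pyRange 1 ((row_data.length : Int) + 1) 1).foldl
            (fun (st2 : PySem.Set String × List (List String)) x =>
              let row_data_item := (PySem.List.pyGet? row_data (-x)).getD []
              let timestamp := (PySem.List.pyGet? row_data_item t_pos).getD ""
              if !(PySem.Set.contains st2.1 timestamp) then
                (PySem.Set.add st2.1 timestamp, st2.2 ++ [row_data_item])
              else st2)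
            (st.1, ([] : List (List String)))
        if st2.2.length > 0 then (st2.1, st.2 ++ [(row_cols, st2.2.reverse)])
        else (st2.1, st.2))
      (PySem.Set.empty, ([] : List (List String × List (List String))))
  st.2.reverse

-- ===== PORT B =====
-- literal transliteration of Source B: pass 1 counts timestamps, pass 2 decrements and keeps count-zero items
def remove_duplicates_from_batch_alt (unique_col : String) (data : List (List String × List (List String))) : List (List String × List (List String)) :=
  let counts : PySem.Dict String Int :=
    data.foldl
      (fun (counts : PySem.Dict String Int) row =>
        let t_pos : Int := (((PySem.List.index? row.1 unique_col).getD 0 : Nat) : Int)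
        row.2.foldl
          (fun (counts : PySem.Dict String Int) item =>
            let ts := (PySem.List.pyGet? item t_pos).getD ""
            counts.insert ts (counts.getD ts 0 + 1))
          counts)
      PySem.Dict.empty
  let st :=
    data.foldl
      (fun (st : List (List String × List (List String)) × PySem.Dict String Int) row =>
        let t_pos : Int := (((PySem.List.index? row.1 unique_col).getD 0 : Nat) : Int)
        let st2 :=
          row.2.foldl
            (fun (st2 : PySem.Dict String Int × List (List String)) item =>
              let ts := (PySem.List.pyGet? item t_pos).getD ""
              let d := st2.1.insert ts (st2.1.getD ts 0 - 1)
              if d.getD ts 0 == 0 then (d, st2.2 ++ [item]) else (d, st2.2))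
            (st.2, ([] : List (List String)))
        if !st2.2.isEmpty then (st.1 ++ [(row.1, st2.2)], st2.1) else (st.1, st2.1))
      (([] : List (List String × List (List String))), counts)
  st.1

-- ===== PRECONDITION & SPEC =====
-- Pre_ excludes exactly the inputs where Python A raises: a row whose columns miss unique_col
-- (ValueError from .index) or an item too short for t_pos (IndexError).
def Pre_remove_duplicates_from_batch (unique_col : String) (data : List (List String × List (List String))) : Prop :=
  ∀ row ∈ data, unique_col ∈ row.1 ∧ ∀ item ∈ row.2, row.1.idxOf unique_col < item.length
instance (unique_col : String) (data : List (List String × List (List String))) : Decidable (Pre_remove_duplicates_from_batch unique_col data) := by unfold Pre_remove_duplicates_from_batch; infer_instance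

def pvWitness_remove_duplicates_from_batch : String × (List (List String × List (List String))) :=
  ("t", [(["t", "v"], [["1", "a"], ["1", "b"]]), (["v", "t"], [["c", "1"], ["d", "2"]])])

def Spec_remove_duplicates_from_batch (unique_col : String) (data : List (List String × List (List String))) (out : List (List String × List (List String))) : Prop := out = remove_duplicates_from_batch_alt unique_col data
instance (unique_col : String) (data : List (List String × List (List String))) (out : List (List String × List (List String))) : Decidable (Spec_remove_duplicates_from_batch unique_col data out) := by unfold Spec_remove_duplicates_from_batch; infer_instance

-- ===== CLAIM (what is proved, stated in full; the proofs are below) =====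
def Claim_equal_remove_duplicates_from_batch : Prop := ∀ (unique_col : String) (data : List (List String × List (List String))), Dom_remove_duplicates_from_batch unique_col data → Pre_remove_duplicates_from_batch unique_col data → Spec_remove_duplicates_from_batch unique_col data (remove_duplicates_from_batch unique_col data)

-- ===== LEMMAS AND PROOFS =====

-- timestamp of an item, exactly as both ports compute it
def pvTs (unique_col : String) (cols : List String) (item : List String) : String :=
  (PySem.List.pyGet? item (((PySem.List.index? cols unique_col).getD 0 : Nat) : Int)).getD ""

def pvRowTs (unique_col : String) (row : List String × List (List String)) : List String :=
  row.2.map (pvTs unique_col row.1)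

def pvAllTs (unique_col : String) (rows : List (List String × List (List String))) : List String :=
  rows.flatMap (pvRowTs unique_col)

-- common specification: keep an item iff its timestamp does not occur later (within the row, in later rows, or in F)
def pvSpecRow (f : List String → String) (items : List (List String)) (F : List String) : List (List String) :=
  match items with
  | [] => []
  | it :: rest =>
    if f it ∈ rest.map f ++ F then pvSpecRow f rest F
    else it :: pvSpecRow f rest F

def pvSpec (unique_col : String) (rows : List (List String × List (List String))) (F : List String) : List (List String × List (List String)) :=
  match rows with
  | [] => []
  | r :: rest =>
    let kept := pvSpecRow (pvTs unique_col r.1) r.2 (pvAllTs unique_col rest ++ F)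
    if kept.isEmpty then pvSpec unique_col rest F else (r.1, kept) :: pvSpec unique_col rest F

-- A's loops, renamed as reverse folds
def pvAIn (f : List String → String) (st2 : PySem.Set String × List (List String)) (item : List String) : PySem.Set String × List (List String) :=
  let timestamp := f item
  if !(PySem.Set.contains st2.1 timestamp) then
    (PySem.Set.add st2.1 timestamp, st2.2 ++ [item])
  else st2

def pvAOut (unique_col : String) (st : PySem.Set String × List (List String × List (List String))) (row : List String × List (List String)) : PySem.Set String × List (List String × List (List String)) :=
  let st2 := row.2.reverse.foldl (pvAIn (pvTs unique_col row.1)) (st.1, [])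
  if st2.2.length > 0 then (st2.1, st.2 ++ [(row.1, st2.2.reverse)])
  else (st2.1, st.2)

-- B's loops, named
def pvBCnt (unique_col : String) (d : PySem.Dict String Int) (row : List String × List (List String)) : PySem.Dict String Int :=
  row.2.foldl
    (fun d item =>
      d.insert (pvTs unique_col row.1 item) (d.getD (pvTs unique_col row.1 item) 0 + 1)) d

def pvBIn (f : List String → String) (st2 : PySem.Dict String Int × List (List String)) (item : List String) : PySem.Dict String Int × List (List String) :=
  let ts := f item
  let d := st2.1.insert ts (st2.1.getD ts 0 - 1)
  if d.getD ts 0 == 0 then (d, st2.2 ++ [item]) else (d, st2.2)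

def pvBOut (unique_col : String) (st : List (List String × List (List String)) × PySem.Dict String Int) (row : List String × List (List String)) : List (List String × List (List String)) × PySem.Dict String Int :=
  let st2 := row.2.foldl (pvBIn (pvTs unique_col row.1)) (st.2, [])
  if !st2.2.isEmpty then (st.1 ++ [(row.1, st2.2)], st2.1) else (st.1, st2.1)

-- a Python loop 'for i in range(1, len(xs)+1): … xs[-i] …' is a fold over xs.reverse
theorem pv_map_neg_range {α : Type} (xs : List α) (d : α) :
    (PySem.List.pyRange 1 ((xs.length : Int) + 1) 1).map (fun i => (PySem.List.pyGet? xs (-i)).getD d) = xs.reverse := by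
  rw [PySem.List.pyRange_one]
  have hlen : (((xs.length : Int) + 1) - 1).toNat = xs.length := by omega
  rw [hlen, List.map_map]
  apply List.ext_getElem
  · simp
  · intro k h1 h2
    simp only [List.getElem_map, List.getElem_range, Function.comp]
    have hk : k < xs.length := by simpa using h1
    have hcast : (1 : Int) + (k : Int) = ((k + 1 : Nat) : Int) := by push_cast; ring
    rw [hcast, PySem.List.pyGet?_neg_natCast xs (k + 1) (by omega) (by omega)]
    rw [List.getElem_reverse]
    have hlt : xs.length - (k + 1) < xs.length := by omega
    simp [List.getElem?_eq_getElem hlt]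
    congr 1
    omega

theorem pv_foldl_neg_range {α β : Type} (xs : List α) (d : α) (g : β → α → β) (init : β) :
    (PySem.List.pyRange 1 ((xs.length : Int) + 1) 1).foldl (fun st i => g st ((PySem.List.pyGet? xs (-i)).getD d)) init = xs.reverse.foldl g init := by
  rw [← pv_map_neg_range xs d, List.foldl_map]

-- pyRange-shaped twin of pvAOut, definitionally equal to A's loop body
def pvAOutR (unique_col : String) (st : PySem.Set String × List (List String × List (List String))) (row : List String × List (List String)) : PySem.Set String × List (List String × List (List String)) :=
  let st2 := (PySem.List.pyRange 1 ((row.2.length : Int) + 1) 1).foldl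
      (fun st2 x => pvAIn (pvTs unique_col row.1) st2 ((PySem.List.pyGet? row.2 (-x)).getD []))
      (st.1, ([] : List (List String)))
  if st2.2.length > 0 then (st2.1, st.2 ++ [(row.1, st2.2.reverse)])
  else (st2.1, st.2)

theorem pvAOutR_eq (unique_col : String) (st : PySem.Set String × List (List String × List (List String))) (row : List String × List (List String)) :
    pvAOutR unique_col st row = pvAOut unique_col st row := by
  unfold pvAOutR pvAOut
  rw [pv_foldl_neg_range row.2 [] (pvAIn (pvTs unique_col row.1)) (st.1, [])]

theorem pvA_eq (unique_col : String) (data : List (List String × List (List String))) :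
    remove_duplicates_from_batch unique_col data
      = (data.reverse.foldl (pvAOut unique_col) (PySem.Set.empty, [])).2.reverse := by
  show ((PySem.List.pyRange 1 ((data.length : Int) + 1) 1).foldl
      (fun st i => pvAOutR unique_col st ((PySem.List.pyGet? data (-i)).getD ([], []))) (PySem.Set.empty, [])).2.reverse = _
  rw [pv_foldl_neg_range data ([], []) (pvAOutR unique_col) (PySem.Set.empty, [])]
  have h : pvAOutR unique_col = pvAOut unique_col :=
    funext fun st => funext fun row => pvAOutR_eq unique_col st row
  rw [h]

theorem pvB_eq (unique_col : String) (data : List (List String × List (List String))) :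
    remove_duplicates_from_batch_alt unique_col data
      = (data.foldl (pvBOut unique_col) ([], data.foldl (pvBCnt unique_col) PySem.Dict.empty)).1 := by
  rfl

theorem pvSpecRow_congr (f : List String → String) (items : List (List String)) (F F' : List String)
    (h : ∀ t, t ∈ F ↔ t ∈ F') : pvSpecRow f items F = pvSpecRow f items F' := by
  induction items with
  | nil => rfl
  | cons it rest ih =>
    simp only [pvSpecRow, List.mem_append, h, ih]

theorem pvA_inner (f : List String → String) (items : List (List String)) (S : PySem.Set String) (acc : List (List String)) :
    items.reverse.foldl (pvAIn f) (S, acc)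
      = (PySem.Set.update S (items.map f).reverse, acc ++ (pvSpecRow f items S).reverse) := by
  induction items with
  | nil => simp [pvSpecRow, PySem.Set.update]
  | cons it rest ih =>
    rw [List.reverse_cons, List.foldl_append, ih]
    simp only [List.foldl_cons, List.foldl_nil]
    have hset : PySem.Set.update S ((it :: rest).map f).reverse
        = PySem.Set.add (PySem.Set.update S (rest.map f).reverse) (f it) := by
      rw [List.map_cons, List.reverse_cons, PySem.Set.update_append, PySem.Set.update_cons, PySem.Set.update_nil]
    by_cases hmem : f it ∈ rest.map f ++ S
    · have hc : PySem.Set.contains (PySem.Set.update S (rest.map f).reverse) (f it) = true := by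
        rw [PySem.Set.contains_iff, PySem.Set.mem_update]
        rcases List.mem_append.1 hmem with h | h
        · right; simpa using h
        · left; exact h
      simp only [pvAIn, hc, Bool.not_true, if_neg, Bool.false_eq_true, not_false_eq_true]
      rw [hset, PySem.Set.add_of_mem]
      · simp [pvSpecRow, hmem]
      · rw [PySem.Set.mem_update]
        rcases List.mem_append.1 hmem with h | h
        · right; simpa using h
        · left; exact h
    · have hc : PySem.Set.contains (PySem.Set.update S (rest.map f).reverse) (f it) = false := by
        rw [Bool.eq_false_iff]
        intro hco
        rw [PySem.Set.contains_iff, PySem.Set.mem_update] at hco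
        apply hmem
        rcases hco with h | h
        · exact List.mem_append.2 (Or.inr h)
        · exact List.mem_append.2 (Or.inl (by simpa using h))
      simp only [pvAIn, hc, Bool.not_false, ite_true]
      rw [hset]
      simp [pvSpecRow, hmem]

theorem pvA_outer (unique_col : String) (rows : List (List String × List (List String))) (S : PySem.Set String) (acc : List (List String × List (List String))) :
    rows.reverse.foldl (pvAOut unique_col) (S, acc)
      = (PySem.Set.update S (pvAllTs unique_col rows).reverse, acc ++ (pvSpec unique_col rows S).reverse) := by
  induction rows with
  | nil => simp [pvSpec, pvAllTs, PySem.Set.update]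
  | cons r rest ih =>
    rw [List.reverse_cons, List.foldl_append, ih]
    simp only [List.foldl_cons, List.foldl_nil]
    have hcg : pvSpecRow (pvTs unique_col r.1) r.2 (PySem.Set.update S (pvAllTs unique_col rest).reverse)
        = pvSpecRow (pvTs unique_col r.1) r.2 (pvAllTs unique_col rest ++ S) := by
      apply pvSpecRow_congr
      intro t
      rw [PySem.Set.mem_update, List.mem_append, List.mem_reverse, or_comm]
    have hset : PySem.Set.update (PySem.Set.update S (pvAllTs unique_col rest).reverse) (List.map (pvTs unique_col r.1) r.2).reverse
        = PySem.Set.update S (pvAllTs unique_col (r :: rest)).reverse := by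
      have hAll : pvAllTs unique_col (r :: rest) = List.map (pvTs unique_col r.1) r.2 ++ pvAllTs unique_col rest := by
        simp [pvAllTs, pvRowTs]
      rw [hAll, ← PySem.Set.update_append, ← List.reverse_append]
    rw [pvAOut, pvA_inner, hcg]
    simp only [List.nil_append]
    set kept := pvSpecRow (pvTs unique_col r.1) r.2 (pvAllTs unique_col rest ++ S) with hk
    by_cases hke : kept = []
    · have hsp : pvSpec unique_col (r :: rest) S = pvSpec unique_col rest S := by
        simp [pvSpec, ← hk, hke]
      simp only [hke, List.length_reverse, List.length_nil, gt_iff_lt, lt_irrefl, if_neg, not_false_eq_true]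
      rw [hset, hsp]
    · have hlen : 0 < kept.reverse.length := by
        simp [List.length_pos_iff]
        exact hke
      simp only [gt_iff_lt, hlen, if_pos, List.reverse_reverse]
      rw [hset]
      have hsp : pvSpec unique_col (r :: rest) S = (r.1, kept) :: pvSpec unique_col rest S := by
        simp [pvSpec, ← hk, hke]
      rw [hsp, List.reverse_cons, ← List.append_assoc]

theorem pvB_count (unique_col : String) (rows : List (List String × List (List String))) (d : PySem.Dict String Int) (t : String) :
    (rows.foldl (pvBCnt unique_col) d).getD t 0 = d.getD t 0 + ((pvAllTs unique_col rows).count t : Int) := by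
  induction rows generalizing d with
  | nil => simp [pvAllTs]
  | cons r rest ih =>
    rw [List.foldl_cons, ih]
    have hb : (pvBCnt unique_col d r).getD t 0 = d.getD t 0 + ((pvRowTs unique_col r).count t : Int) := by
      unfold pvBCnt
      rw [show (r.2.foldl (fun d item => d.insert (pvTs unique_col r.1 item) (d.getD (pvTs unique_col r.1 item) 0 + 1)) d)
            = ((r.2.map (pvTs unique_col r.1)).foldl (fun d x => d.insert x (d.getD x 0 + 1)) d) from
            (List.foldl_map (f := pvTs unique_col r.1) (g := fun (d : PySem.Dict String Int) x => d.insert x (d.getD x 0 + 1)) (l := r.2) (init := d)).symm]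
      rw [PySem.Dict.getD_foldl_insert_add_one]
      rfl
    rw [hb]
    have hAll : pvAllTs unique_col (r :: rest) = pvRowTs unique_col r ++ pvAllTs unique_col rest := by
      simp [pvAllTs]
    rw [hAll, List.count_append]
    push_cast
    ring

theorem pvB_inner (f : List String → String) (G : List String) (items : List (List String)) (d : PySem.Dict String Int) (acc : List (List String))
    (hd : ∀ t, d.getD t 0 = ((items.map f ++ G).count t : Int)) :
    (items.foldl (pvBIn f) (d, acc)).2 = acc ++ pvSpecRow f items G
    ∧ ∀ t, (items.foldl (pvBIn f) (d, acc)).1.getD t 0 = (G.count t : Int) := by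
  induction items generalizing d acc with
  | nil =>
    refine ⟨by simp [pvSpecRow], fun t => ?_⟩
    simpa using hd t
  | cons it rest ih =>
    rw [List.foldl_cons]
    have hself : (d.insert (f it) (d.getD (f it) 0 - 1)).getD (f it) 0
        = (((rest.map f ++ G).count (f it) : Nat) : Int) := by
      rw [PySem.Dict.getD_insert_self, hd (f it)]
      simp [List.count_cons_self]
    have hd2 : ∀ t, (d.insert (f it) (d.getD (f it) 0 - 1)).getD t 0 = (((rest.map f ++ G).count t : Nat) : Int) := by
      intro t
      by_cases ht : t = f it
      · rw [ht]; exact hself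
      · rw [PySem.Dict.getD_insert_of_ne _ _ _ ht, hd t]
        have hne : ¬ (f it = t) := fun h => ht h.symm
        simp [hne]
    by_cases hmem : f it ∈ rest.map f ++ G
    · have hpos : (rest.map f ++ G).count (f it) ≠ 0 := by
        intro h
        exact (List.count_eq_zero.mp h) hmem
      have hcond : ((d.insert (f it) (d.getD (f it) 0 - 1)).getD (f it) 0 == 0) = false := by
        rw [hself, beq_eq_false_iff_ne]
        intro h
        omega
      simp only [pvBIn, hcond, Bool.false_eq_true, if_neg, not_false_eq_true]
      have := ih (d.insert (f it) (d.getD (f it) 0 - 1)) acc hd2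
      refine ⟨?_, this.2⟩
      rw [this.1]
      simp [pvSpecRow, hmem]
    · have hzero : (rest.map f ++ G).count (f it) = 0 := List.count_eq_zero.2 hmem
      have hcond : ((d.insert (f it) (d.getD (f it) 0 - 1)).getD (f it) 0 == 0) = true := by
        rw [hself, hzero]
        simp
      simp only [pvBIn, hcond, ite_true]
      have := ih (d.insert (f it) (d.getD (f it) 0 - 1)) (acc ++ [it]) hd2
      refine ⟨?_, this.2⟩
      rw [this.1]
      simp [pvSpecRow, hmem]

theorem pvB_outer (unique_col : String) (rows : List (List String × List (List String))) (d : PySem.Dict String Int) (out : List (List String × List (List String)))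
    (hd : ∀ t, d.getD t 0 = ((pvAllTs unique_col rows).count t : Int)) :
    (rows.foldl (pvBOut unique_col) (out, d)).1 = out ++ pvSpec unique_col rows [] := by
  induction rows generalizing d out with
  | nil => simp [pvSpec]
  | cons r rest ih =>
    rw [List.foldl_cons]
    have hAll : pvAllTs unique_col (r :: rest) = pvRowTs unique_col r ++ pvAllTs unique_col rest := by
      simp [pvAllTs]
    have hd' : ∀ t, d.getD t 0 = (((r.2.map (pvTs unique_col r.1) ++ pvAllTs unique_col rest).count t : Nat) : Int) := by
      intro t
      rw [hd t, hAll]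
      rfl
    have hin := pvB_inner (pvTs unique_col r.1) (pvAllTs unique_col rest) r.2 d [] hd'
    rw [pvBOut]
    simp only [hin.1, List.nil_append]
    set kept := pvSpecRow (pvTs unique_col r.1) r.2 (pvAllTs unique_col rest) with hk
    by_cases hke : kept = []
    · have : pvSpec unique_col (r :: rest) [] = pvSpec unique_col rest [] := by
        simp [pvSpec, ← hk, hke]
      rw [this]
      simp only [hke, List.isEmpty_nil, Bool.not_true, Bool.false_eq_true, if_neg, not_false_eq_true]
      exact ih _ _ hin.2
    · have hne : (!kept.isEmpty) = true := by
        simpa using hke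
      simp only [hne, ite_true]
      rw [ih _ _ hin.2]
      have : pvSpec unique_col (r :: rest) [] = (r.1, kept) :: pvSpec unique_col rest [] := by
        simp [pvSpec, ← hk, hke]
      rw [this]
      simp

-- ===== VERDICT (by name: the statement is the Claim_ definition above) =====
theorem remove_duplicates_from_batch_spec : Claim_equal_remove_duplicates_from_batch := by
  intro unique_col data _ _
  unfold Spec_remove_duplicates_from_batch
  rw [pvA_eq, pvA_outer, pvB_eq, pvB_outer]
  · simp
  · intro t
    rw [pvB_count]
    simp [PySem.Dict.getD_empty]
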